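-- pv_equiv track=rewrite | github.com/Alt3z/Python_various_projects | Тинька_экзамен_на_Python_разработчика/Брусок_Димы/main.py | solve
-- ===== SOURCE A (Python) =====
-- def min_parts(a, s):
--     count = 1
--     current_sum = 0
--
--     for length in a:
--         if current_sum + length > s:
--             count += 1
--             current_sum = 0
--         current_sum += length
--
--     return count
--
-- def solve(n, s, a):
--     result = 0
--
--     for l in range(n):
--         current_sum = 0
--         for r in range(l, n):
--             current_sum += a[r]
--             if current_sum > s:
--                 result += min_parts(a[l:r+1], s)
--             else:
--                 result += 1
--
--     return result
-- ===== SOURCE B (Python) =====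
-- def solve(n, s, a):
--     # Incremental greedy: for each l, as r grows keep the running prefix sum and
--     # the greedy partition count of a[l:r+1], so no inner re-scan is needed.
--     result = 0
--     for l in range(n):
--         prefix = 0
--         cnt = 1
--         cur = 0
--         for r in range(l, n):
--             x = a[r]
--             if cur + x > s:
--                 cnt += 1
--                 cur = 0
--             cur += x
--             prefix += x
--             result += cnt if prefix > s else 1
--     return result
-- ===== Notes on version B (the rewrite author's own statement) =====
-- stated objective: faster
-- what changed: Instead of recomputing min_parts on the slice a[l:r+1] for every (l,r), B maintains the greedy partition count and running prefix sum incrementally as r grows for each fixed l, eliminating the inner re-scan.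
import Mathlib
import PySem

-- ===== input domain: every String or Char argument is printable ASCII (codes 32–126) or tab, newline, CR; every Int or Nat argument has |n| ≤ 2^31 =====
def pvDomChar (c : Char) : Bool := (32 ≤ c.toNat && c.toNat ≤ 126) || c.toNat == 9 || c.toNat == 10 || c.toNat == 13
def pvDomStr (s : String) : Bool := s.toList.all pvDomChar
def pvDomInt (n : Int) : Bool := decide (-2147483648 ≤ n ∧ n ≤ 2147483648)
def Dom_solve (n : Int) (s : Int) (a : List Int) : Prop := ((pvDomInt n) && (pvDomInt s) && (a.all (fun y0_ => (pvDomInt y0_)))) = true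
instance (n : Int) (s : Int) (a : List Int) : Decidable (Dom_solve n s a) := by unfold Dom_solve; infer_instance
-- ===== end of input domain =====

-- B replaces A's per-(l,r) re-scan of the slice a[l:r+1] by an incremental greedy count kept as r grows for each l.

-- ===== PORT A =====
-- one step of min_parts' loop body (count, current_sum) -> updated pair
def mpStep (s : Int) (p : Int × Int) (x : Int) : Int × Int :=
  if p.2 + x > s then (p.1 + 1, x) else (p.1, p.2 + x)

def min_parts (a : List Int) (s : Int) : Int :=
  (a.foldl (mpStep s) ((1 : Int), (0 : Int))).1

-- a[r] is ported as pyGetD; Pre_solve below excludes exactly the inputs where Python's a[r] raises IndexError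
def solve (n : Int) (s : Int) (a : List Int) : Int :=
  (PySem.List.pyRange 0 n 1).foldl (fun result l =>
    ((PySem.List.pyRange l n 1).foldl
      (fun (p : Int × Int) r =>
        let cs := p.2 + PySem.List.pyGetD a r 0
        if cs > s then (p.1 + min_parts (PySem.List.slice a (some l) (some (r + 1))) s, cs)
        else (p.1 + 1, cs))
      (result, (0 : Int))).1) 0

-- ===== PORT B =====
-- state is (result, prefix, cnt, cur), exactly Source B's four loop variables
def solve_alt (n : Int) (s : Int) (a : List Int) : Int :=
  (PySem.List.pyRange 0 n 1).foldl (fun result l =>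
    ((PySem.List.pyRange l n 1).foldl
      (fun (st : Int × Int × Int × Int) r =>
        let x := PySem.List.pyGetD a r 0
        let cc := if st.2.2.2 + x > s then (st.2.2.1 + 1, x) else (st.2.2.1, st.2.2.2 + x)
        (st.1 + (if st.2.1 + x > s then cc.1 else 1), st.2.1 + x, cc.1, cc.2))
      (result, (0 : Int), (1 : Int), (0 : Int))).1) 0

-- ===== PRECONDITION & SPEC =====
-- Pre_ excludes only the inputs where A raises IndexError (n exceeds the length of a)
def Pre_solve (n : Int) (s : Int) (a : List Int) : Prop := n ≤ (a.length : Int)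
instance (n : Int) (s : Int) (a : List Int) : Decidable (Pre_solve n s a) := by unfold Pre_solve; infer_instance
def pvWitness_solve : Int × Int × List Int := (3, 3, [1, 2, 3])

def Spec_solve (n : Int) (s : Int) (a : List Int) (out : Int) : Prop := out = solve_alt n s a
instance (n : Int) (s : Int) (a : List Int) (out : Int) : Decidable (Spec_solve n s a out) := by unfold Spec_solve; infer_instance

-- ===== CLAIM (what is proved, stated in full; the proofs are below) =====
def Claim_equal_solve : Prop := ∀ (n : Int) (s : Int) (a : List Int), Dom_solve n s a → Pre_solve n s a → Spec_solve n s a (solve n s a)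

-- ===== LEMMAS AND PROOFS =====

theorem slice_self (a : List Int) (l : Int) (h0 : 0 ≤ l) :
    PySem.List.slice a (some l) (some l) = [] := by
  rw [PySem.List.slice_toNat a h0 h0]; simp

-- extending the slice a[l:m] by one element a[m]
theorem slice_snoc (a : List Int) (l m : Int) (h0 : 0 ≤ l) (hlm : l ≤ m) (hm : m < (a.length : Int)) :
    PySem.List.slice a (some l) (some (m + 1)) =
      PySem.List.slice a (some l) (some m) ++ [PySem.List.pyGetD a m 0] := by
  have h0m : 0 ≤ m := le_trans h0 hlm
  rw [PySem.List.slice_toNat a h0 (by omega), PySem.List.slice_toNat a h0 h0m]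
  have h1 : (m + 1).toNat = m.toNat + 1 := by omega
  have h2 : m.toNat + 1 - l.toNat = (m.toNat - l.toNat) + 1 := by omega
  have hmlen : m.toNat < a.length := by omega
  rw [h1, h2, List.take_succ, List.getElem?_drop]
  have h3 : l.toNat + (m.toNat - l.toNat) = m.toNat := by omega
  have h4 : PySem.List.pyGetD a m 0 = a[m.toNat] := by
    rw [PySem.List.pyGetD_eq_getElem] <;> omega
  rw [h3, List.getElem?_eq_getElem hmlen, h4]
  rfl

-- B's incremental (cnt, cur) is exactly min_parts' fold over the slice processed so far,
-- so the two inner loops produce the same result component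
theorem inner_eq (a : List Int) (s n l : Int) (h0 : 0 ≤ l) (hn : n ≤ (a.length : Int)) :
    ∀ (k : Nat) (m : Int), l ≤ m → (n - m).toNat ≤ k →
    ∀ (res cs : Int) (p : Int × Int),
      p = (PySem.List.slice a (some l) (some m)).foldl (mpStep s) (1, 0) →
      ((PySem.List.pyRange m n 1).foldl
        (fun (q : Int × Int) r =>
          let c := q.2 + PySem.List.pyGetD a r 0
          if c > s then (q.1 + min_parts (PySem.List.slice a (some l) (some (r + 1))) s, c)
          else (q.1 + 1, c))
        (res, cs)).1 =
      ((PySem.List.pyRange m n 1).foldl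
        (fun (st : Int × Int × Int × Int) r =>
          let x := PySem.List.pyGetD a r 0
          let cc := if st.2.2.2 + x > s then (st.2.2.1 + 1, x) else (st.2.2.1, st.2.2.2 + x)
          (st.1 + (if st.2.1 + x > s then cc.1 else 1), st.2.1 + x, cc.1, cc.2))
        (res, cs, p.1, p.2)).1 := by
  intro k
  induction k with
  | zero =>
    intro m hlm hk res cs p hp
    rw [PySem.List.pyRange_one_eq_nil (by omega)]; rfl
  | succ k ih =>
    intro m hlm hk res cs p hp
    by_cases hmn : m < n
    · rw [PySem.List.pyRange_one_cons hmn]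
      simp only [List.foldl_cons]
      have hm_lt : m < (a.length : Int) := lt_of_lt_of_le hmn hn
      have hsnoc := slice_snoc a l m h0 hlm hm_lt
      set x := PySem.List.pyGetD a m 0 with hx
      have hp' : mpStep s p x = (PySem.List.slice a (some l) (some (m + 1))).foldl (mpStep s) (1, 0) := by
        rw [hsnoc, List.foldl_append, ← hp]; rfl
      have hmp : min_parts (PySem.List.slice a (some l) (some (m + 1))) s = (mpStep s p x).1 := by
        rw [min_parts, ← hp']
      simp only [hmp]
      have hik := ih (m + 1) (by omega) (by omega)
      by_cases hc : cs + x > s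
      · simp only [if_pos hc]
        exact hik (res + (mpStep s p x).1) (cs + x) (mpStep s p x) hp'
      · simp only [if_neg hc]
        exact hik (res + 1) (cs + x) (mpStep s p x) hp'
    · rw [PySem.List.pyRange_one_eq_nil (by omega)]; rfl

-- ===== VERDICT (by name: the statement is the Claim_ definition above) =====
theorem solve_spec : Claim_equal_solve := by
  intro n s a _ hpre
  unfold Spec_solve solve solve_alt
  apply PySem.List.foldl_congr_mem
  intro acc l' hl'
  have h0 : 0 ≤ l' := ((PySem.List.mem_pyRange_one).mp hl').1
  exact inner_eq a s n l' h0 hpre (n - l').toNat l' le_rfl le_rfl acc 0 (1, 0)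
    (by rw [slice_self a l' h0, List.foldl_nil])
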